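-- pv_equiv track=rewrite | github.com/aalokpatwa/cardcounting | strategy.py | get_hand_index
-- ===== SOURCE A (Python) =====
-- def get_hand_index(player_hand: list, start=False):
--     hand = sorted(player_hand)
--
--     # If we're on our original two cards, we can split
--     if start:
--         # Decide whether to split
--         if hand[0] == hand[1]:
--             return str(hand[0]) + str(hand[1])
--
--         # Soft hand
--         if hand[1] == "A":
--             return "A" + hand[0]
--
--         # No ace
--         integer_version = [int(card) for card in hand]
--         return str(sum(integer_version))
--
--     else:
--         # If we have AA after doubling/splitting, treat as 12
--         if len(hand) == 2 and hand[0] == "A" and hand[1] == "A":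
--             return "12"
--
--         # Otherwise, determine whether to play hard or soft ace
--         if hand[-1] == "A":
--             previous_ints = [int(card) if card != "A" else 1 for card in hand[:-1]]
--
--             # Can't play a soft hand -- previous cards total more than 10
--             if sum(previous_ints) > 10:
--                 return str(sum(previous_ints) + 1)
--
--             # Soft hand
--             return "A" + str(sum(previous_ints))
--
--         # No aces in the hand
--         integer_version = [int(card) for card in hand]
--         return str(sum(integer_version))
-- ===== SOURCE B (Python) =====
-- def get_hand_index(player_hand: list, start=False):
--     # Sort-free: classify by the min/second-min (start) or by ace count and
--     # non-ace sum (running hand). Return value only; no mutation of the input.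
--     num_aces = player_hand.count("A")
--     others = [c for c in player_hand if c != "A"]
--     if start:
--         m = min(player_hand)
--         rest = list(player_hand)
--         rest.remove(m)
--         m2 = min(rest)
--         if m == m2:
--             return m + m2
--         if m2 == "A":
--             return "A" + m
--         return str(sum(int(c) for c in player_hand))
--     else:
--         if num_aces == 2 and len(player_hand) == 2:
--             return "12"
--         if max(player_hand) == "A":
--             soft = sum(int(c) for c in others) + (num_aces - 1)
--             if soft > 10:
--                 return str(soft + 1)
--             return "A" + str(soft)
--         return str(sum(int(c) for c in player_hand))
-- ===== Notes on version B (the rewrite author's own statement) =====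
-- stated objective: simpler
-- what changed: B drops A's sort entirely: the start branch works from min and second-min of the hand, the running branch from the ace count, the max card and the sum of the non-ace cards, so no sorted copy of the hand is built.
import Mathlib
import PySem

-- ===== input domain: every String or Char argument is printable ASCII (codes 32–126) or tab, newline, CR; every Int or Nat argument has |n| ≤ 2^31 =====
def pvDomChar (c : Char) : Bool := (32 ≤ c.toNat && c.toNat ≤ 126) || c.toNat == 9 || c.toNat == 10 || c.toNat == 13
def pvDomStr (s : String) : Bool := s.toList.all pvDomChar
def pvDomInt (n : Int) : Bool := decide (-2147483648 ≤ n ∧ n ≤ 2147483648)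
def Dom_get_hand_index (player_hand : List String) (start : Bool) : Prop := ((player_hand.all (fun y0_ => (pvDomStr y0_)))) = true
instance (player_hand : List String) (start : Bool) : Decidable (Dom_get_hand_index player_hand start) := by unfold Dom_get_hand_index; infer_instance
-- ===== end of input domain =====

-- B replaces A's sort by direct min / second-min / max and ace-count arithmetic
-- (objective: simpler; return value only — neither version mutates its input).

-- sum of a list of Python values that may raise while being produced:
-- pvOSum g xs = some (sum of g-values) if every g c is some, else none (= the comprehension raised)
def pvOSum (g : String → Option Int) : List String → Option Int
  | [] => some 0
  | c :: t =>
    match g c, pvOSum g t with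
    | some i, some s => some (i + s)
    | _, _ => none

-- ===== PORT A =====
def get_hand_index (player_hand : List String) (start : Bool) : String :=
  let hand := PySem.List.sorted player_hand (fun x => x) false
  if start then
    match PySem.List.pyGet? hand 0, PySem.List.pyGet? hand 1 with
    | some h0, some h1 =>
      if h0 = h1 then h0 ++ h1
      else if h1 = "A" then "A" ++ h0
      else
        match pvOSum PySem.Int.ofStr? hand with   -- integer_version = [int(card) for card in hand]
        | some s => PySem.Int.toStr s
        | none => ""                               -- ValueError: excluded by Pre_
    | _, _ => ""                                   -- IndexError (hand shorter than 2): excluded by Pre_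
  else
    if hand.length == 2 && (PySem.List.pyGet? hand 0 == some "A") && (PySem.List.pyGet? hand 1 == some "A") then
      "12"
    else
      match PySem.List.pyGet? hand (-1) with
      | some lastc =>
        if lastc = "A" then
          match pvOSum (fun c => if c = "A" then some 1 else PySem.Int.ofStr? c)
                  (PySem.List.slice hand none (some (-1))) with  -- hand[:-1]
          | some p => if p > 10 then PySem.Int.toStr (p + 1) else "A" ++ PySem.Int.toStr p
          | none => ""                             -- ValueError: excluded by Pre_
        else
          match pvOSum PySem.Int.ofStr? hand with
          | some s => PySem.Int.toStr s
          | none => ""                             -- ValueError: excluded by Pre_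
      | none => ""                                 -- IndexError on []: excluded by Pre_

-- ===== PORT B =====
def get_hand_index_alt (player_hand : List String) (start : Bool) : String :=
  let numAces : Int := PySem.List.count player_hand "A"
  let others := player_hand.filter (fun c => !(c == "A"))
  if start then
    match PySem.List.min? player_hand (fun x => x) with
    | some m =>
      match PySem.List.remove? player_hand m with
      | some rest =>
        match PySem.List.min? rest (fun x => x) with
        | some m2 =>
          if m = m2 then m ++ m2
          else if m2 = "A" then "A" ++ m
          else
            match pvOSum PySem.Int.ofStr? player_hand with
            | some s => PySem.Int.toStr s
            | none => ""                           -- ValueError: excluded by Pre_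
        | none => ""                               -- min([]) ValueError: excluded by Pre_
      | none => ""                                 -- unreachable (m ∈ player_hand)
    | none => ""                                   -- min([]) ValueError: excluded by Pre_
  else
    if numAces == 2 && player_hand.length == 2 then
      "12"
    else
      match PySem.List.max? player_hand (fun x => x) with
      | some mx =>
        if mx = "A" then
          match pvOSum PySem.Int.ofStr? others with
          | some s =>
            let soft := s + (numAces - 1)
            if soft > 10 then PySem.Int.toStr (soft + 1) else "A" ++ PySem.Int.toStr soft
          | none => ""                             -- ValueError: excluded by Pre_
        else
          match pvOSum PySem.Int.ofStr? player_hand with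
          | some s => PySem.Int.toStr s
          | none => ""                             -- ValueError: excluded by Pre_
      | none => ""                                 -- max([]) ValueError: excluded by Pre_

-- ===== PRECONDITION & SPEC =====
-- Pre_ holds exactly where the Python A returns: a start hand needs two cards, a running hand
-- needs one, and every card that reaches int() must parse ("A" is special only where A treats it so).
def Pre_get_hand_index (player_hand : List String) (start : Bool) : Prop :=
  let s := PySem.List.sorted player_hand (fun x => x) false
  if start then
    2 ≤ player_hand.length ∧
      (PySem.List.pyGet? s 0 = PySem.List.pyGet? s 1 ∨ PySem.List.pyGet? s 1 = some "A" ∨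
       ∀ c ∈ player_hand, (PySem.Int.ofStr? c).isSome = true)
  else
    player_hand ≠ [] ∧
      ((player_hand.length = 2 ∧ PySem.List.count player_hand "A" = 2) ∨
       (PySem.List.pyGet? s (-1) = some "A" ∧
        ∀ c ∈ player_hand, c = "A" ∨ (PySem.Int.ofStr? c).isSome = true) ∨
       (PySem.List.pyGet? s (-1) ≠ some "A" ∧
        ∀ c ∈ player_hand, (PySem.Int.ofStr? c).isSome = true))
instance (player_hand : List String) (start : Bool) : Decidable (Pre_get_hand_index player_hand start) := by
  unfold Pre_get_hand_index; infer_instance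

def pvWitness_get_hand_index : List String × Bool := (["A", "A"], false)

def Spec_get_hand_index (player_hand : List String) (start : Bool) (out : String) : Prop := out = get_hand_index_alt player_hand start
instance (player_hand : List String) (start : Bool) (out : String) : Decidable (Spec_get_hand_index player_hand start out) := by unfold Spec_get_hand_index; infer_instance

-- ===== CLAIM (what is proved, stated in full; the proofs are below) =====
def Claim_equal_get_hand_index : Prop := ∀ (player_hand : List String) (start : Bool), Dom_get_hand_index player_hand start → Pre_get_hand_index player_hand start → Spec_get_hand_index player_hand start (get_hand_index player_hand start)

-- ===== LEMMAS AND PROOFS =====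

theorem pvOSum_perm (g : String → Option Int) {xs ys : List String} (h : xs.Perm ys) :
    pvOSum g xs = pvOSum g ys := by
  induction h with
  | nil => rfl
  | cons x _ ih => simp [pvOSum, ih]
  | swap x y t =>
    simp only [pvOSum]
    cases g x <;> cases g y <;> cases pvOSum g t <;> simp <;> omega
  | trans _ _ ih1 ih2 => exact ih1.trans ih2

theorem pvOSum_soft (xs : List String) :
    pvOSum (fun c => if c = "A" then some 1 else PySem.Int.ofStr? c) xs =
      (pvOSum PySem.Int.ofStr? (xs.filter (fun c => !(c == "A")))).map
        (fun z => z + (xs.count "A" : Int)) := by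
  induction xs with
  | nil => simp [pvOSum]
  | cons c t ih =>
    by_cases hc : c = "A"
    · subst hc
      rcases ho : pvOSum PySem.Int.ofStr? (t.filter (fun c => !(c == "A"))) with _ | z <;>
        · simp [pvOSum, ih, ho, List.count_cons]
          try push_cast
          try ring
    · rcases ho : pvOSum PySem.Int.ofStr? (t.filter (fun c => !(c == "A"))) with _ | z <;>
        rcases hg : PySem.Int.ofStr? c with _ | i <;>
        · simp [pvOSum, ih, ho, hg, List.filter_cons, List.count_cons, hc]
          try push_cast
          try ring

-- a Pairwise-(≤) list is bounded by its last element
theorem pv_pairwise_le_getLast {l : List String} {z : String}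
    (hpw : l.Pairwise (fun a b => a ≤ b)) (hz : l.getLast? = some z) :
    ∀ x ∈ l, x ≤ z := by
  induction l with
  | nil => simp at hz
  | cons c cs ih =>
    cases cs with
    | nil =>
      simp only [List.getLast?_singleton, Option.some.injEq] at hz
      intro x hx
      simp only [List.mem_singleton] at hx
      simp [hx, hz]
    | cons d ds =>
      have hz' : (d :: ds).getLast? = some z := by simpa using hz
      intro x hx
      rcases List.mem_cons.mp hx with rfl | hx'
      · exact (List.pairwise_cons.mp hpw).1 z (List.mem_of_getLast? hz')
      · exact ih (List.pairwise_cons.mp hpw).2 hz' x hx'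

-- the head of sorted(xs) is min(xs)
theorem pv_min_head {xs t : List String} {a : String}
    (h : PySem.List.sorted xs (fun x => x) false = a :: t) :
    PySem.List.min? xs (fun x => x) = some a := by
  have hxs : xs ≠ [] := by
    intro h0; rw [h0] at h; simp [PySem.List.sorted] at h
  have hperm : (PySem.List.sorted xs (fun x => x) false).Perm xs :=
    PySem.List.sorted_perm xs (fun x => x) false
  have hmem : a ∈ xs := by rw [h] at hperm; exact hperm.mem_iff.mp (by simp)
  have hpw : (PySem.List.sorted xs (fun x => x) false).Pairwise (fun x y => x ≤ y) :=
    PySem.List.sorted_pairwise xs (fun x => x)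
  rw [h] at hpw
  have hle : ∀ y ∈ xs, a ≤ y := by
    intro y hy
    rw [h] at hperm
    rcases List.mem_cons.mp (hperm.mem_iff.mpr hy) with rfl | hy'
    · exact le_refl y
    · exact (List.pairwise_cons.mp hpw).1 y hy'
  rcases hm : PySem.List.min? xs (fun x => x) with _ | m
  · rw [PySem.List.min?_eq_none_iff] at hm; exact absurd hm hxs
  · have h1 := PySem.List.min?_isMin hm a hmem
    have h2 := hle m (PySem.List.min?_mem hm)
    exact congrArg some (le_antisymm h2 h1).symm

-- the second element of sorted(xs) is min(xs with one copy of the min removed)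
theorem pv_min_second {xs t : List String} {a b : String}
    (h : PySem.List.sorted xs (fun x => x) false = a :: b :: t) :
    PySem.List.min? (xs.erase a) (fun x => x) = some b := by
  have hperm : (PySem.List.sorted xs (fun x => x) false).Perm xs :=
    PySem.List.sorted_perm xs (fun x => x) false
  have hperm' : (xs.erase a).Perm (b :: t) := by
    have h2 := hperm.symm.erase a
    rw [h] at h2
    simpa using h2
  have hpw : (PySem.List.sorted xs (fun x => x) false).Pairwise (fun x y => x ≤ y) :=
    PySem.List.sorted_pairwise xs (fun x => x)
  rw [h] at hpw
  have hbmin : ∀ y ∈ b :: t, b ≤ y := by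
    intro y hy
    rcases List.mem_cons.mp hy with rfl | hy'
    · exact le_refl y
    · exact (List.pairwise_cons.mp (List.pairwise_cons.mp hpw).2).1 y hy'
  rcases hm : PySem.List.min? (xs.erase a) (fun x => x) with _ | m
  · rw [PySem.List.min?_eq_none_iff] at hm
    rw [hm] at hperm'
    exact absurd hperm'.symm (by simp)
  · have hmmem : m ∈ b :: t := hperm'.mem_iff.mp (PySem.List.min?_mem hm)
    have h1 : b ≤ m := hbmin m hmmem
    have h2 : m ≤ b := PySem.List.min?_isMin hm b (hperm'.mem_iff.mpr (by simp))
    exact congrArg some (le_antisymm h1 h2).symm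

-- the last element of sorted(xs) is max(xs)
theorem pv_max_last {xs : List String} {l : String}
    (h : (PySem.List.sorted xs (fun x => x) false).getLast? = some l) :
    PySem.List.max? xs (fun x => x) = some l := by
  have hperm : (PySem.List.sorted xs (fun x => x) false).Perm xs :=
    PySem.List.sorted_perm xs (fun x => x) false
  have hpw : (PySem.List.sorted xs (fun x => x) false).Pairwise (fun x y => x ≤ y) :=
    PySem.List.sorted_pairwise xs (fun x => x)
  have hlmem : l ∈ xs := hperm.mem_iff.mp (List.mem_of_getLast? h)
  have hxs : xs ≠ [] := fun h0 => by simp [h0] at hlmem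
  have hmax : ∀ y ∈ xs, y ≤ l := fun y hy =>
    pv_pairwise_le_getLast hpw h y (hperm.mem_iff.mpr hy)
  rcases hm : PySem.List.max? xs (fun x => x) with _ | m
  · rw [PySem.List.max?_eq_none_iff] at hm; exact absurd hm hxs
  · have h1 := PySem.List.max?_isMax hm l hlmem
    have h2 := hmax m (PySem.List.max?_mem hm)
    exact congrArg some (le_antisymm h2 h1)

-- A's pair-of-aces test on the sorted hand equals B's count-based test
theorem pv_guard (hand : List String) :
    ((PySem.List.sorted hand (fun x => x) false).length == 2 &&
      (PySem.List.pyGet? (PySem.List.sorted hand (fun x => x) false) 0 == some "A") &&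
      (PySem.List.pyGet? (PySem.List.sorted hand (fun x => x) false) 1 == some "A"))
    = ((PySem.List.count hand "A" : Int) == 2 && (hand.length == 2)) := by
  have hperm : (PySem.List.sorted hand (fun x => x) false).Perm hand :=
    PySem.List.sorted_perm hand (fun x => x) false
  have hlens : (PySem.List.sorted hand (fun x => x) false).length = hand.length :=
    hperm.length_eq
  have hcnt : (PySem.List.sorted hand (fun x => x) false).count "A" = hand.count "A" :=
    hperm.count_eq "A"
  by_cases h2 : hand.length = 2
  · rcases hseq : PySem.List.sorted hand (fun x => x) false with _ | ⟨x, _ | ⟨y, _ | _⟩⟩ <;>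
      rw [hseq] at hlens <;> try (exfalso; simp at hlens; omega)
    rw [hseq] at hcnt
    rw [PySem.List.count_eq, ← hcnt]
    by_cases hx : x = "A" <;> by_cases hy : y = "A" <;>
      simp [PySem.List.pyGet?, PySem.List.pyIdx?, hx, hy, h2, List.count_cons, hlens]
  · have hA : (hand.length == 2) = false := by simp [h2]
    have hB : ((PySem.List.sorted hand (fun x => x) false).length == 2) = false := by
      simp [hlens, h2]
    simp [hA, hB]

theorem get_hand_index_spec : Claim_equal_get_hand_index := by
  intro hand start hdom hpre
  unfold Spec_get_hand_index get_hand_index get_hand_index_alt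
  unfold Pre_get_hand_index at hpre
  have hperm : (PySem.List.sorted hand (fun x => x) false).Perm hand :=
    PySem.List.sorted_perm hand (fun x => x) false
  have hlens : (PySem.List.sorted hand (fun x => x) false).length = hand.length :=
    hperm.length_eq
  cases start
  · -- start = false
    simp only [Bool.false_eq_true, if_false, ite_false] at hpre ⊢
    obtain ⟨hne, -⟩ := hpre
    rw [pv_guard hand]
    by_cases hg : ((PySem.List.count hand "A" : Int) == 2 && (hand.length == 2)) = true
    · rw [if_pos hg, if_pos hg]
    · rw [if_neg hg, if_neg hg]
      have hsne : PySem.List.sorted hand (fun x => x) false ≠ [] := by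
        intro h0
        rw [h0] at hlens
        exact hne (List.length_eq_zero_iff.mp hlens.symm)
      rcases hlast : (PySem.List.sorted hand (fun x => x) false).getLast? with _ | l
      · exact absurd (List.getLast?_eq_none_iff.mp hlast) hsne
      · rw [PySem.List.pyGet?_neg_one, hlast, pv_max_last hlast]
        dsimp only
        by_cases hA : l = "A"
        · subst hA
          rw [if_pos rfl, if_pos rfl]
          have hAmem : "A" ∈ hand := hperm.mem_iff.mp (List.mem_of_getLast? hlast)
          have hslice : PySem.List.slice (PySem.List.sorted hand (fun x => x) false) none (some (-1))
              = (PySem.List.sorted hand (fun x => x) false).dropLast := by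
            simp [PySem.List.slice, List.dropLast_eq_take]
          rw [hslice]
          have hgl : (PySem.List.sorted hand (fun x => x) false).getLast hsne = "A" := by
            have := List.getLast?_eq_getLast hsne
            rw [hlast] at this
            exact (Option.some.injEq _ _ ▸ this).symm
          have hconcat : (PySem.List.sorted hand (fun x => x) false).dropLast ++ ["A"]
              = PySem.List.sorted hand (fun x => x) false := by
            have := List.dropLast_append_getLast hsne
            rw [hgl] at this
            exact this
          have hd : ("A" :: (PySem.List.sorted hand (fun x => x) false).dropLast).Perm
              ("A" :: hand.erase "A") := by
            have h1 : ("A" :: (PySem.List.sorted hand (fun x => x) false).dropLast).Perm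
                ((PySem.List.sorted hand (fun x => x) false).dropLast ++ ["A"]) :=
              (List.perm_append_singleton _ _).symm
            rw [hconcat] at h1
            exact h1.trans (hperm.trans (List.perm_cons_erase hAmem))
          have hdp := hd.cons_inv
          rw [pvOSum_perm _ hdp, pvOSum_soft]
          have hfil : pvOSum PySem.Int.ofStr? ((hand.erase "A").filter (fun c => !(c == "A")))
              = pvOSum PySem.Int.ofStr? (hand.filter (fun c => !(c == "A"))) := by
            apply pvOSum_perm
            have := (List.perm_cons_erase hAmem).filter (fun c => !(c == "A"))
            simpa using this.symm
          rw [hfil]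
          have hcnt : (((hand.erase "A").count "A" : Nat) : Int) = ((hand.count "A" : Nat) : Int) - 1 := by
            rw [List.count_erase_self]
            have h1 : 0 < hand.count "A" := List.count_pos_iff.mpr hAmem
            omega
          rcases ho : pvOSum PySem.Int.ofStr? (hand.filter (fun c => !(c == "A"))) with _ | z
          · simp
          · simp only [Option.map_some]
            rw [hcnt, PySem.List.count_eq]
        · rw [if_neg hA, if_neg hA, pvOSum_perm PySem.Int.ofStr? hperm]
  · -- start = true
    simp only [if_true, ite_true] at hpre ⊢
    obtain ⟨hlen, -⟩ := hpre
    rcases hseq : PySem.List.sorted hand (fun x => x) false with _ | ⟨a, _ | ⟨b, t⟩⟩ <;>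
      rw [hseq] at hlens <;> try (exfalso; simp at hlens; omega)
    have hsort : PySem.List.sorted hand (fun x => x) false = a :: b :: t := hseq
    have hmem : a ∈ hand := by
      have hp := hperm
      rw [hsort] at hp
      exact hp.mem_iff.mp (by simp)
    have hperm' : (a :: b :: t).Perm hand := by rw [← hsort]; exact hperm
    have hget1 : PySem.List.pyGet? (a :: b :: t) 1 = some b := by
      simp [PySem.List.pyGet?, PySem.List.pyIdx?]
    rw [pv_min_head hsort]
    dsimp only
    rw [PySem.List.remove?_eq_some_erase _ _ hmem]
    dsimp only
    rw [pv_min_second hsort]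
    dsimp only
    rw [PySem.List.pyGet?_zero_cons, hget1]
    dsimp only
    rw [pvOSum_perm PySem.Int.ofStr? hperm']
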